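-- pv_equiv track=rewrite | github.com/AmirKatorza/AWS_reStart_Subnet_Claculator | functions.py | first_addr
-- ===== SOURCE A (Python) =====
-- def first_addr(broadcast_ip: list, network_ip: list) -> list:
--     first_addr_ip = []
--     for i in range(4):
--         if broadcast_ip[i] == network_ip[i]:
--             first_addr_ip.append(network_ip[i])
--         else:
--             # broadcast_ip[i] = ~ broadcast_ip[i] & 0xFF
--             if i == 3:
--                 first_addr_ip.append((network_ip[i] + 1))
--             else:
--                 first_addr_ip.append(network_ip[i])
--     return first_addr_ip
-- ===== SOURCE B (Python) =====
-- def first_addr(broadcast_ip: list, network_ip: list) -> list: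
--     # Recursive descent consuming both lists head-first; only the pair at the
--     # final position is ever compared, earlier octets are passed through.
--     def go(bs, ns, remaining):
--         if remaining == 0:
--             return []
--         b, n = bs[0], ns[0]
--         if remaining == 1:
--             return [n if b == n else n + 1]
--         return [n] + go(bs[1:], ns[1:], remaining - 1)
--     return go(broadcast_ip, network_ip, 4)
-- ===== Notes on version B (the rewrite author's own statement) =====
-- stated objective: alternative
-- what changed: Replaces the index loop with per-octet equality branching by a structural recursion that consumes both lists head-first, passes early octets through untouched, and performs a single equality comparison only at the final position to decide the +1.
import Mathlib
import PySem

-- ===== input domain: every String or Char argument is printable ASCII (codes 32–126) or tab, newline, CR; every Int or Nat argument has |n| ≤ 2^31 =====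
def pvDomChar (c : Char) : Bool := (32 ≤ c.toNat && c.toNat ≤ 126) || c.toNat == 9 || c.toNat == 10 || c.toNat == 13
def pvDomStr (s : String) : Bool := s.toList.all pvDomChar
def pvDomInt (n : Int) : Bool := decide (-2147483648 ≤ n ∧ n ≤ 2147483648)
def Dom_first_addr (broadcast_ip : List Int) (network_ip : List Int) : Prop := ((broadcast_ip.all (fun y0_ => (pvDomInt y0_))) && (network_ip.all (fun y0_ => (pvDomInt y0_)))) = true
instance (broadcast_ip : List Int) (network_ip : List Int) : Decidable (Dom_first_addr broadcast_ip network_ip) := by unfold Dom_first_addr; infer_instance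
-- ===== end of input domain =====

-- B replaces A's index loop (which branches on octet equality at every position) by a
-- structural recursion consuming both lists head-first, comparing only at the final
-- position (objective: alternative decomposition, same cost).

-- ===== PORT A =====
-- Literal port of A: loop over range(4), appending octet by octet.
-- Indexing uses pyGetD (total form); exact under Pre_, which guarantees every index is in range.
def first_addr (broadcast_ip : List Int) (network_ip : List Int) : List Int :=
  (PySem.List.pyRange 0 4 1).foldl
    (fun first_addr_ip i =>
      if PySem.List.pyGetD broadcast_ip i 0 == PySem.List.pyGetD network_ip i 0 then
        first_addr_ip ++ [PySem.List.pyGetD network_ip i 0]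
      else
        if i == 3 then
          first_addr_ip ++ [PySem.List.pyGetD network_ip i 0 + 1]
        else
          first_addr_ip ++ [PySem.List.pyGetD network_ip i 0]) []

-- ===== PORT B =====
-- Literal port of B's recursive helper go(bs, ns, remaining); remaining is the Nat
-- recursion counter (Python's nonnegative int), bs[0]/ns[0] via pyGetD (in range under
-- Pre_), bs[1:] via slice.
def firstAddrGo (bs ns : List Int) (remaining : Nat) : List Int :=
  match remaining with
  | 0 => []
  | Nat.succ r =>
    let b := PySem.List.pyGetD bs 0 0
    let n := PySem.List.pyGetD ns 0 0
    if r = 0 then [if b == n then n else n + 1]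
    else [n] ++ firstAddrGo (PySem.List.slice bs (some 1) none) (PySem.List.slice ns (some 1) none) r

def first_addr_alt (broadcast_ip : List Int) (network_ip : List Int) : List Int :=
  firstAddrGo broadcast_ip network_ip 4

-- ===== PRECONDITION & SPEC =====
-- Pre_ excludes exactly the inputs on which Python A raises IndexError: either list shorter than 4.
def Pre_first_addr (broadcast_ip : List Int) (network_ip : List Int) : Prop :=
  4 ≤ broadcast_ip.length ∧ 4 ≤ network_ip.length
instance (broadcast_ip : List Int) (network_ip : List Int) : Decidable (Pre_first_addr broadcast_ip network_ip) := by unfold Pre_first_addr; infer_instance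
def pvWitness_first_addr : List Int × List Int := ([10, 0, 0, 255], [10, 0, 0, 0])

def Spec_first_addr (broadcast_ip : List Int) (network_ip : List Int) (out : List Int) : Prop := out = first_addr_alt broadcast_ip network_ip
instance (broadcast_ip : List Int) (network_ip : List Int) (out : List Int) : Decidable (Spec_first_addr broadcast_ip network_ip out) := by unfold Spec_first_addr; infer_instance

-- ===== CLAIM (what is proved, stated in full; the proofs are below) =====
def Claim_equal_first_addr : Prop := ∀ (broadcast_ip : List Int) (network_ip : List Int), Dom_first_addr broadcast_ip network_ip → Pre_first_addr broadcast_ip network_ip → Spec_first_addr broadcast_ip network_ip (first_addr broadcast_ip network_ip)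

-- ===== LEMMAS AND PROOFS =====

lemma pvGetD_cons4_one (a b c d : Int) (xs : List Int) :
    PySem.List.pyGetD (a :: b :: c :: d :: xs) 1 0 = b := by
  simp [PySem.List.pyGetD, PySem.List.pyGet?, PySem.List.pyIdx?]
  split
  · simp
  · omega

lemma pvGetD_cons4_two (a b c d : Int) (xs : List Int) :
    PySem.List.pyGetD (a :: b :: c :: d :: xs) 2 0 = c := by
  simp [PySem.List.pyGetD, PySem.List.pyGet?, PySem.List.pyIdx?]
  split
  · simp
  · omega

lemma pvGetD_cons4_three (a b c d : Int) (xs : List Int) :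
    PySem.List.pyGetD (a :: b :: c :: d :: xs) 3 0 = d := by
  simp [PySem.List.pyGetD, PySem.List.pyGet?, PySem.List.pyIdx?]
  split
  · simp
  · omega

lemma pvSliceTail_cons (a : Int) (xs : List Int) :
    PySem.List.slice (a :: xs) (some 1) none = xs := by
  simp [PySem.List.slice]

-- ===== VERDICT (by name: the statement is the Claim_ definition above) =====
set_option maxHeartbeats 1000000 in
theorem first_addr_spec : Claim_equal_first_addr := by
  intro broadcast_ip network_ip _ hpre
  unfold Spec_first_addr
  obtain ⟨hb, hn⟩ := hpre
  obtain ⟨b0, b1, b2, b3, bs, rfl⟩ :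
      ∃ b0 b1 b2 b3 bs, broadcast_ip = b0 :: b1 :: b2 :: b3 :: bs := by
    rcases broadcast_ip with _ | ⟨b0, _ | ⟨b1, _ | ⟨b2, _ | ⟨b3, bs⟩⟩⟩⟩ <;>
      first | exact ⟨_, _, _, _, _, rfl⟩ | simp at hb
  obtain ⟨n0, n1, n2, n3, ns, rfl⟩ :
      ∃ n0 n1 n2 n3 ns, network_ip = n0 :: n1 :: n2 :: n3 :: ns := by
    rcases network_ip with _ | ⟨n0, _ | ⟨n1, _ | ⟨n2, _ | ⟨n3, ns⟩⟩⟩⟩ <;>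
      first | exact ⟨_, _, _, _, _, rfl⟩ | simp at hn
  have hr : PySem.List.pyRange 0 4 1 = [0, 1, 2, 3] := by decide
  simp only [first_addr, first_addr_alt, firstAddrGo, hr, List.foldl,
             PySem.List.pyGetD_zero_cons, pvGetD_cons4_one, pvGetD_cons4_two,
             pvGetD_cons4_three, pvSliceTail_cons]
  split_ifs <;> simp_all
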